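-- pv_equiv track=rewrite | github.com/WilliamsRotolo/autocaricamento | NEWSECTION/app.py | extract_url_from_srcset
-- ===== SOURCE A (Python) =====
-- def extract_url_from_srcset(srcset_value: str) -> str:
--     """Estrae il primo URL utile da un attributo srcset."""
--     if not srcset_value:
--         return ""
--     parts = [p.strip() for p in srcset_value.split(",") if p.strip()]
--     if not parts:
--         return ""
--     first = parts[0]
--     return first.split()[0].strip()
-- ===== SOURCE B (Python) =====
-- def extract_url_from_srcset(srcset_value: str) -> str:
--     """Estrae il primo URL utile da un attributo srcset (single index scan)."""
--     i = 0
--     n = len(srcset_value)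
--     while i < n and (srcset_value[i].isspace() or srcset_value[i] == ','):
--         i += 1
--     j = i
--     while j < n and not (srcset_value[j].isspace() or srcset_value[j] == ','):
--         j += 1
--     return srcset_value[i:j]
-- ===== Notes on version B (the rewrite author's own statement) =====
-- stated objective: simpler
-- what changed: A splits on commas, strips each piece, filters out empties and then whitespace-splits the first piece; B is a single left-to-right index scan that skips leading whitespace/commas and returns the first maximal run free of whitespace and commas, building no intermediate lists.
import Mathlib
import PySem

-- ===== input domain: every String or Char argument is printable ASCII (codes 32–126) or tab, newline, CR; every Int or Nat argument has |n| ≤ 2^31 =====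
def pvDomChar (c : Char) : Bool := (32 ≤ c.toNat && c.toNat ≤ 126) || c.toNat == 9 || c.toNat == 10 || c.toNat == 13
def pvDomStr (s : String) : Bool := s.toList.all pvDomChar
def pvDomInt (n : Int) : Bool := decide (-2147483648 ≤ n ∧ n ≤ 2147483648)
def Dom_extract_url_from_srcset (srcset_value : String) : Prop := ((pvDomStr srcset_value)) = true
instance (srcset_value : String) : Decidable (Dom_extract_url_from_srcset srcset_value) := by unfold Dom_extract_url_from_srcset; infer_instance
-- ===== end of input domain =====

-- B replaces A's split-on-comma / strip / filter / split-on-whitespace pipeline by a single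
-- left-to-right scan (skip separators, then take the first separator-free run); objective: simpler.

-- ===== PORT A =====
def extract_url_from_srcset (srcset_value : String) : String :=
  -- if not srcset_value: return ""
  if srcset_value = "" then ""
  else
    -- parts = [p.strip() for p in srcset_value.split(",") if p.strip()]
    let parts := (PySem.Chars.splitOn srcset_value.toList [',']).filterMap
      (fun p => let q := PySem.Chars.strip p; if q.isEmpty then none else some q)
    -- if not parts: return "" ; first = parts[0]
    match parts with
    | [] => ""
    | first :: _ =>
      -- return first.split()[0].strip()
      -- index 0 is provably in range (first is stripped and non-empty, so first.split() is
      -- non-empty); the .getD [] default is unreachable (proved below), never a substituted value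
      String.ofList (PySem.Chars.strip ((PySem.List.pyGet? (PySem.Chars.split₀ first) 0).getD []))

-- ===== PORT B =====
-- Source B: first while loop advances i over whitespace/commas (= dropWhile), second advances j
-- over non-whitespace non-comma chars (= takeWhile), returns the slice [i:j] (= the taken run)
def extract_url_from_srcset_alt (srcset_value : String) : String :=
  let cs := srcset_value.toList
  let start := cs.dropWhile (fun c => PySem.Chars.isspace c || c == ',')
  String.ofList (start.takeWhile (fun c => !(PySem.Chars.isspace c || c == ',')))

-- ===== PRECONDITION & SPEC =====
def Spec_extract_url_from_srcset (srcset_value : String) (out : String) : Prop := out = extract_url_from_srcset_alt srcset_value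
instance (srcset_value : String) (out : String) : Decidable (Spec_extract_url_from_srcset srcset_value out) := by unfold Spec_extract_url_from_srcset; infer_instance

-- ===== CLAIM (what is proved, stated in full; the proofs are below) =====
def Claim_equal_extract_url_from_srcset : Prop := ∀ (srcset_value : String), Dom_extract_url_from_srcset srcset_value → Spec_extract_url_from_srcset srcset_value (extract_url_from_srcset srcset_value)

-- ===== LEMMAS AND PROOFS =====

-- simple accumulator-style single-char comma split (what splitOn.go computes for sep = [','])
def pvCommaSplit : List Char → List Char → List (List Char)
  | [], cur => [cur.reverse]
  | c :: r, cur => if c = ',' then cur.reverse :: pvCommaSplit r [] else pvCommaSplit r (c :: cur)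

-- accumulator-free form of split₀.go
def pvWords : List Char → List Char → List (List Char)
  | [], cur => if cur.isEmpty then [] else [cur.reverse]
  | c :: r, cur =>
    if PySem.Chars.isspace c then
      if cur.isEmpty then pvWords r [] else cur.reverse :: pvWords r []
    else pvWords r (c :: cur)

theorem pvSplitOn_go_eq (fuel : Nat) (l cur acc) (h : l.length < fuel) :
    PySem.Chars.splitOn.go [','] fuel l cur acc = acc.reverse ++ pvCommaSplit l cur := by
  induction fuel generalizing l cur acc with
  | zero => omega
  | succ fuel ih =>
    cases l with
    | nil => simp [PySem.Chars.splitOn.go, pvCommaSplit]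
    | cons c r =>
      by_cases hc : c = ','
      · subst hc
        simp only [PySem.Chars.splitOn.go, List.isPrefixOf, BEq.rfl, if_true,
          List.length_cons, List.drop_succ_cons, Bool.and_true, List.length_nil, List.drop_zero]
        rw [ih r [] (cur.reverse :: acc) (by simpa using Nat.lt_of_succ_lt_succ h)]
        simp [pvCommaSplit]
      · have hne : ((',' == c) && true) = false := by
          simp; intro hh; exact absurd hh.symm hc
        simp only [PySem.Chars.splitOn.go, List.isPrefixOf, hne, Bool.false_eq_true, if_false]
        rw [ih r (c :: cur) acc (by simpa using Nat.lt_of_succ_lt_succ h)]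
        simp [pvCommaSplit, hc]

theorem pvSplitOn_comma (cs : List Char) :
    PySem.Chars.splitOn cs [','] = pvCommaSplit cs [] := by
  unfold PySem.Chars.splitOn
  rw [pvSplitOn_go_eq _ _ _ _ (by omega)]
  simp

theorem pvSplit₀_go_eq (l cur acc) :
    PySem.Chars.split₀.go l cur acc = acc.reverse ++ pvWords l cur := by
  induction l generalizing cur acc with
  | nil =>
    by_cases hc : cur.isEmpty
    · simp [PySem.Chars.split₀.go, pvWords, hc]
    · simp [PySem.Chars.split₀.go, pvWords, hc]
  | cons c r ih =>
    by_cases hs : PySem.Chars.isspace c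
    · by_cases hc : cur.isEmpty
      · simp [PySem.Chars.split₀.go, pvWords, hs, hc, ih]
      · simp [PySem.Chars.split₀.go, pvWords, hs, hc, ih]
    · simp [PySem.Chars.split₀.go, pvWords, hs, ih]

def pvCommaRest (l : List Char) : List (List Char) :=
  match l.dropWhile (fun c => !(c = ',')) with
  | [] => []
  | _ :: r => pvCommaSplit r []

theorem pvCommaSplit_eq (l : List Char) (cur : List Char) :
    pvCommaSplit l cur = (cur.reverse ++ l.takeWhile (fun c => !(c = ','))) :: pvCommaRest l := by
  induction l generalizing cur with
  | nil => simp [pvCommaSplit, pvCommaRest]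
  | cons c r ih =>
    by_cases hc : c = ','
    · subst hc
      simp [pvCommaSplit, pvCommaRest]
    · simp only [pvCommaSplit, if_neg hc, ih (c :: cur), List.reverse_cons,
        List.takeWhile_cons, List.dropWhile_cons, pvCommaRest]
      simp [hc]

theorem pvWords_cur (l : List Char) (cur : List Char) (h : cur ≠ []) :
    pvWords l cur = (cur.reverse ++ l.takeWhile (fun c => !PySem.Chars.isspace c)) ::
      pvWords (l.dropWhile (fun c => !PySem.Chars.isspace c)) [] := by
  induction l generalizing cur with
  | nil => simp [pvWords, List.isEmpty_iff, h]
  | cons c r ih =>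
    by_cases hs : PySem.Chars.isspace c
    · simp [pvWords, hs, List.isEmpty_iff, h]
    · simp only [pvWords, hs, Bool.false_eq_true, if_false, List.isEmpty_iff, h,
        List.takeWhile_cons, List.dropWhile_cons, Bool.not_false, if_true]
      rw [ih (c :: cur) (by simp)]
      simp

theorem pvRstrip_cons (c : Char) (x : List Char) (h : PySem.Chars.isspace c = false) :
    PySem.Chars.rstrip (c :: x) = c :: PySem.Chars.rstrip x := by
  unfold PySem.Chars.rstrip
  rw [List.reverse_cons, List.dropWhile_append]
  by_cases he : (x.reverse.dropWhile PySem.Chars.isspace).isEmpty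
  · simp [h, List.isEmpty_iff.mp he]
  · simp [he]

theorem pvStrip_cons_space (c : Char) (x : List Char) (h : PySem.Chars.isspace c = true) :
    PySem.Chars.strip (c :: x) = PySem.Chars.strip x := by
  unfold PySem.Chars.strip PySem.Chars.lstrip
  rw [List.dropWhile_cons, if_pos h]

theorem pvTakeWhile_rstrip (x : List Char) :
    (PySem.Chars.rstrip x).takeWhile (fun c => !PySem.Chars.isspace c) =
      x.takeWhile (fun c => !PySem.Chars.isspace c) := by
  induction x with
  | nil => simp [PySem.Chars.rstrip]
  | cons c r ih =>
    by_cases hs : PySem.Chars.isspace c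
    · rw [List.takeWhile_cons, if_neg (by simp [hs])]
      have hpre : PySem.Chars.rstrip (c :: r) <+: c :: r := by
        have := List.reverse_prefix.mpr (List.dropWhile_suffix (l := (c :: r).reverse)
          (p := PySem.Chars.isspace))
        unfold PySem.Chars.rstrip
        simpa using this
      rcases hpre with ⟨t, ht⟩
      cases hq : PySem.Chars.rstrip (c :: r) with
      | nil => simp
      | cons d q =>
        rw [hq] at ht
        have hd : d = c := by
          have := congrArg (fun l => l.head?) ht
          simpa using this
        subst hd
        rw [List.takeWhile_cons, if_neg (by simp [hs])]
    · rw [pvRstrip_cons c r (by simp [hs]), List.takeWhile_cons, List.takeWhile_cons]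
      simp [hs, ih]

theorem pvStrip_of_all_nonspace (x : List Char) (h : ∀ c ∈ x, PySem.Chars.isspace c = false) :
    PySem.Chars.strip x = x := by
  have hl : List.dropWhile PySem.Chars.isspace x = x :=
    List.dropWhile_eq_self_iff.mpr (fun hne => by
      have := h _ (List.getElem_mem hne); simpa using this)
  have hr : List.dropWhile PySem.Chars.isspace x.reverse = x.reverse :=
    List.dropWhile_eq_self_iff.mpr (fun hne => by
      have hm : x.reverse[0] ∈ x := List.mem_reverse.mp (List.getElem_mem hne)
      have := h _ hm; simpa using this)
  unfold PySem.Chars.strip PySem.Chars.lstrip PySem.Chars.rstrip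
  rw [hl, hr, List.reverse_reverse]

-- the main char-level equivalence
theorem pvMain (cs : List Char) :
    (match (pvCommaSplit cs []).filterMap
        (fun p => let q := PySem.Chars.strip p; if q.isEmpty then none else some q) with
      | [] => ""
      | first :: _ =>
        String.ofList (PySem.Chars.strip ((PySem.List.pyGet? (PySem.Chars.split₀ first) 0).getD []))) =
    String.ofList ((cs.dropWhile (fun c => PySem.Chars.isspace c || c == ',')).takeWhile
      (fun c => !(PySem.Chars.isspace c || c == ','))) := by
  induction cs with
  | nil => simp [pvCommaSplit, PySem.Chars.strip, PySem.Chars.lstrip, PySem.Chars.rstrip]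
  | cons c r ih =>
    by_cases hc : c = ','
    · subst hc
      have h1 : pvCommaSplit (',' :: r) [] = [] :: pvCommaSplit r [] := by simp [pvCommaSplit]
      rw [h1, List.filterMap_cons]
      have hnil : PySem.Chars.strip ([] : List Char) = [] := rfl
      simp only [hnil, List.isEmpty_nil, if_true]
      rw [ih]
      simp [PySem.Chars.isspace]
    · by_cases hs : PySem.Chars.isspace c
      · have h1 : pvCommaSplit (c :: r) [] = (c :: r.takeWhile (fun c => !(c = ','))) :: pvCommaRest (c :: r) := by
          rw [pvCommaSplit_eq]
          simp [hc]
        have h2 : pvCommaRest (c :: r) = pvCommaRest r := by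
          unfold pvCommaRest
          rw [List.dropWhile_cons, if_pos (by simp [hc])]
        rw [h1, h2, List.filterMap_cons]
        rw [pvStrip_cons_space c _ hs]
        rw [pvCommaSplit_eq r [], List.filterMap_cons] at ih
        simp only [List.reverse_nil, List.nil_append] at ih
        rw [ih]
        simp [hs]
      · -- c is neither a comma nor whitespace: both sides return c-headed token
        have h1 : pvCommaSplit (c :: r) [] = (c :: r.takeWhile (fun c => !(c = ','))) :: pvCommaRest (c :: r) := by
          rw [pvCommaSplit_eq]
          simp [hc]
        set tk := r.takeWhile (fun c => !(c = ',')) with htk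
        have hq : PySem.Chars.strip (c :: tk) = c :: PySem.Chars.rstrip tk := by
          unfold PySem.Chars.strip PySem.Chars.lstrip
          rw [List.dropWhile_cons, if_neg (by simp [hs]), pvRstrip_cons c tk (by simp [hs])]
        rw [h1, List.filterMap_cons]
        simp only [hq, List.isEmpty_cons, if_false, Bool.false_eq_true]
        have hsplit : PySem.Chars.split₀ (c :: PySem.Chars.rstrip tk) =
            (c :: (PySem.Chars.rstrip tk).takeWhile (fun a => !PySem.Chars.isspace a)) ::
              pvWords ((PySem.Chars.rstrip tk).dropWhile (fun a => !PySem.Chars.isspace a)) [] := by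
          unfold PySem.Chars.split₀
          rw [pvSplit₀_go_eq]
          simp only [List.reverse_nil, List.nil_append, pvWords, hs, Bool.false_eq_true, if_false]
          rw [pvWords_cur _ [c] (by simp)]
          simp
        rw [hsplit]
        have hget : PySem.List.pyGet?
            ((c :: (PySem.Chars.rstrip tk).takeWhile (fun a => !PySem.Chars.isspace a)) ::
              pvWords ((PySem.Chars.rstrip tk).dropWhile (fun a => !PySem.Chars.isspace a)) []) 0 =
            some (c :: (PySem.Chars.rstrip tk).takeWhile (fun a => !PySem.Chars.isspace a)) := by
          simp [PySem.List.pyGet?, PySem.List.pyIdx?]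
        rw [hget, Option.getD_some, pvTakeWhile_rstrip]
        have hall : ∀ a ∈ c :: tk.takeWhile (fun a => !PySem.Chars.isspace a),
            PySem.Chars.isspace a = false := by
          intro a ha
          rcases List.mem_cons.mp ha with h | h
          · subst h; simpa using hs
          · have := List.mem_takeWhile_imp h
            simpa using this
        rw [pvStrip_of_all_nonspace _ hall]
        have hrhs : (c :: r).dropWhile (fun c => PySem.Chars.isspace c || c == ',') = c :: r := by
          rw [List.dropWhile_cons, if_neg (by simp [hs, hc])]
        rw [hrhs, List.takeWhile_cons, if_pos (by simp [hs, hc])]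
        congr 2
        rw [htk, List.takeWhile_takeWhile]
        exact congrFun (congrArg List.takeWhile (funext fun a => by
          by_cases h1 : a = ',' <;> by_cases h2 : PySem.Chars.isspace a <;> simp [h1, h2])) r

-- ===== VERDICT (by name: the statement is the Claim_ definition above) =====
theorem extract_url_from_srcset_spec : Claim_equal_extract_url_from_srcset := by
  intro s _
  unfold Spec_extract_url_from_srcset extract_url_from_srcset extract_url_from_srcset_alt
  by_cases hs : s = ""
  · subst hs; rfl
  · rw [if_neg hs, pvSplitOn_comma]
    exact pvMain s.toList
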